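-- pv_equiv track=rewrite | github.com/JHeaon/ALGORITHM_ProblemSolved | 프로그래머스/unrated/155652. 둘만의 암호/둘만의 암호.py | solution
-- ===== SOURCE A (Python) =====
-- import string
--
-- def solution(s, skip, index):
--     case = list(string.ascii_lowercase)
--
--     # 순회하면서 skip 요소 제거
--     for element in skip:
--         case.remove(element)
--
--     # case 길이를 늘려서 만약 index가 초과 됬을 때 다음 요소를 바로 찾을 수 있게 설정
--     # 해당 방법을 할 수 있었던 근거 : 제한 사항에서 INDEX 길이가 길지 않음.
--     case *= 3
--
--     answer = ""
--
--     for element in s: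
--         answer += case[case.index(element) + index]
--
--     return answer
-- ===== SOURCE B (Python) =====
-- import string
--
-- def solution(s, skip, index):
--     abc = string.ascii_lowercase
--     steps = index % (26 - len(skip))
--     out = []
--     for ch in s:
--         k = abc.index(ch)
--         for _ in range(steps):
--             k = (k + 1) % 26
--             while abc[k] in skip:
--                 k = (k + 1) % 26
--         out.append(abc[k])
--     return "".join(out)
-- ===== Notes on version B (the rewrite author's own statement) =====
-- stated objective: alternative
-- what changed: B drops A's list machinery (remove skip letters from a list, triple it, linear-search it with list.index per character): it computes steps = index % n once and shifts each character by walking the 26-letter alphabet cycle one position at a time, skipping the skipped letters, instead of indexing a precomputed reduced list.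
-- outside the precondition, e.g. on solution('', 'abcdefghijklmnopqrstuvwxyz', 3): A returns '', B raises ZeroDivisionError
import Mathlib
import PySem

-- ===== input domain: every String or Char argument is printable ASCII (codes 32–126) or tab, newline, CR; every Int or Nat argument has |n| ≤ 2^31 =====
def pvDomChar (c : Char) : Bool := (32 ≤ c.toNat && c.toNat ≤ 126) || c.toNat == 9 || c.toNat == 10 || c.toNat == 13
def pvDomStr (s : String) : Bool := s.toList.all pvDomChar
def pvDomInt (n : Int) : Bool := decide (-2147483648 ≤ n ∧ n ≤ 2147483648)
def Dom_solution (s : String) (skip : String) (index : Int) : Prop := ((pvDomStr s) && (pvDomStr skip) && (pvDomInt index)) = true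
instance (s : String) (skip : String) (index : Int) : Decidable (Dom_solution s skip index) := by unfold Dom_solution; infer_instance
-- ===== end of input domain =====

-- B replaces A's list machinery (build a reduced alphabet, triple it, linear-search it per
-- character with list.index) with a walk: each character advances (index mod n) single steps
-- around the 26-letter alphabet cycle, stepping over skipped letters (objective: alternative).

-- string.ascii_lowercase as a list of chars (helper of port A, also used by Pre_)
def pvAbc : List Char :=
  ['a','b','c','d','e','f','g','h','i','j','k','l','m',
   'n','o','p','q','r','s','t','u','v','w','x','y','z']

-- the alphabet with the skip letters removed (used by Pre_ and the proofs)
def pvReduced (skip : String) : List Char :=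
  pvAbc.filter (fun c => !(skip.toList.contains c))

-- ===== PORT A =====
def solution (s : String) (skip : String) (index : Int) : String :=
  -- case = list(string.ascii_lowercase); for element in skip: case.remove(element)
  match skip.toList.foldl (fun acc e => acc.bind fun cs => PySem.List.remove? cs e)
      (some pvAbc) with
  | none => ""  -- ValueError from case.remove (excluded by Pre_)
  | some case1 =>
    let case := case1 ++ case1 ++ case1  -- case *= 3
    -- answer = ""; for element in s: answer += case[case.index(element) + index]
    match s.toList.foldl (fun acc e => acc.bind fun ans =>
        ((PySem.List.index? case e).bind fun i =>
            PySem.List.pyGet? case ((i : Int) + index)).map fun ch => ans ++ [ch])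
        (some ([] : List Char)) with
    | none => ""  -- ValueError/IndexError (excluded by Pre_)
    | some ans => String.mk ans

-- ===== PORT B =====
-- the inner "while abc[k] in skip: k = (k + 1) % 26" loop;
-- fuel 26 only makes it total — under Pre_ some letter survives, so it never runs out.
-- (abc[k] is ported as pyGetD: the tested k is always (…) % 26, i.e. in range)
def pvWhileSkip (skipL : List Char) : Nat → Int → Int
  | 0, k => k
  | f + 1, k =>
      if skipL.contains (PySem.List.pyGetD pvAbc k ' ') then
        pvWhileSkip skipL f (PySem.Int.mod (k + 1) 26)
      else k

def solution_alt (s : String) (skip : String) (index : Int) : String :=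
  -- steps = index % (26 - len(skip))
  match PySem.Int.mod? index (26 - PySem.Str.len skip) with
  | none => ""  -- ZeroDivisionError when all 26 letters are skipped (excluded by Pre_)
  | some steps =>
    -- out = []; for ch in s: k = abc.index(ch); for _ in range(steps): …; out.append(abc[k])
    match s.toList.foldl (fun acc ch => acc.bind fun ans =>
        ((PySem.List.index? pvAbc ch).map fun k0 =>
          PySem.List.pyGetD pvAbc
            ((PySem.List.pyRange 0 steps 1).foldl
              (fun k _ => pvWhileSkip skip.toList 26 (PySem.Int.mod (k + 1) 26))
              ((k0 : Nat) : Int)) ' ').map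
          fun ch2 => ans ++ [ch2]) (some ([] : List Char)) with
    | none => ""  -- ValueError from abc.index (excluded by Pre_)
    | some ans => String.mk ans

-- ===== PRECONDITION & SPEC =====
-- Pre_ is where Python A returns AND B returns: skip letters distinct lowercase (else
-- case.remove raises ValueError), every s-character in the reduced alphabet (else
-- list.index raises ValueError), every shifted position inside the tripled list's
-- (negative-wrapping) index range (else IndexError), and skip shorter than the whole
-- alphabet: Pre_ excludes the degenerate full-alphabet skip with empty s, where A
-- returns "" but B's 'index % 0' raises ZeroDivisionError (see claim.json cites).
def Pre_solution (s : String) (skip : String) (index : Int) : Prop :=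
  skip.toList.Nodup ∧ skip.toList.all (fun c => pvAbc.contains c) = true ∧
  skip.toList.length < 26 ∧
  s.toList.all (fun c => (pvReduced skip).contains c &&
    decide (-(3 * ((pvReduced skip).length : Int)) ≤ ((pvReduced skip).idxOf c : Int) + index) &&
    decide (((pvReduced skip).idxOf c : Int) + index < 3 * ((pvReduced skip).length : Int))) = true
instance (s : String) (skip : String) (index : Int) : Decidable (Pre_solution s skip index) := by
  unfold Pre_solution; infer_instance

def pvWitness_solution : String × String × Int := ("bpjqh", "dz", 20)

def Spec_solution (s : String) (skip : String) (index : Int) (out : String) : Prop := out = solution_alt s skip index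
instance (s : String) (skip : String) (index : Int) (out : String) : Decidable (Spec_solution s skip index out) := by unfold Spec_solution; infer_instance

-- ===== CLAIM (what is proved, stated in full; the proofs are below) =====
def Claim_equal_solution : Prop := ∀ (s : String) (skip : String) (index : Int), Dom_solution s skip index → Pre_solution s skip index → Spec_solution s skip index (solution s skip index)

-- ===== LEMMAS AND PROOFS =====

-- the kept character CODES (0..25), in increasing order
def pvKept (skipL : List Char) : List Nat :=
  (List.range 26).filter (fun k => !(skipL.contains (Char.ofNat (97 + k))))

theorem pvAbc_eq : pvAbc = (List.range 26).map (fun k => Char.ofNat (97 + k)) := by decide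


theorem pvReduced_eq (skip : String) :
    pvReduced skip = (pvKept skip.toList).map (fun k => Char.ofNat (97 + k)) := by
  unfold pvReduced pvKept
  rw [pvAbc_eq, List.filter_map]
  simp [Function.comp_def]

theorem pvKept_pairwise (L : List Char) : (pvKept L).Pairwise (· < ·) :=
  List.Pairwise.sublist List.filter_sublist List.pairwise_lt_range

theorem pvKept_mem (L : List Char) (k : Nat) :
    k ∈ pvKept L ↔ k < 26 ∧ L.contains (Char.ofNat (97 + k)) = false := by
  simp [pvKept, List.mem_filter, List.mem_range]

theorem pvKept_lt26 (L : List Char) (i : Nat) (hi : i < (pvKept L).length) :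
    (pvKept L)[i] < 26 :=
  ((pvKept_mem L _).mp (List.getElem_mem hi)).1

theorem pvAbc_get (k : Nat) (hk : k < 26) : pvAbc[k]'hk = Char.ofNat (97 + k) := by
  simp only [pvAbc_eq, List.getElem_map, List.getElem_range]

theorem pvAbc_pyGetD (x : Int) (h0 : 0 ≤ x) (h1 : x < 26) :
    PySem.List.pyGetD pvAbc x ' ' = Char.ofNat (97 + x.toNat) := by
  rw [PySem.List.pyGetD_eq_getElem pvAbc ' ' h0 (by have : pvAbc.length = 26 := rfl; omega)]
  exact pvAbc_get x.toNat (by omega)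

-- the while-loop walks to the first non-skipped code, d advances away
theorem pvWhile_run (L : List Char) : ∀ (d f : Nat) (a : Int), d < f → 0 ≤ a → a < 26 →
    (∀ j : Nat, j < d → L.contains (PySem.List.pyGetD pvAbc ((a + j) % 26) ' ') = true) →
    L.contains (PySem.List.pyGetD pvAbc ((a + d) % 26) ' ') = false →
    pvWhileSkip L f a = (a + d) % 26 := by
  intro d
  induction d with
  | zero =>
    intro f a hdf ha0 ha1 _ hP
    match f, hdf with
    | f + 1, _ =>
      have haa : (a + ((0:Nat):Int)) % 26 = a := by omega
      rw [haa] at hP ⊢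
      have hPm : PySem.List.pyGetD pvAbc a ' ' ∉ L := by simpa using hP
      simp [pvWhileSkip, hPm]
  | succ d ih =>
    intro f a hdf ha0 ha1 hj hP
    match f, hdf with
    | f + 1, hdf =>
      have h0 : L.contains (PySem.List.pyGetD pvAbc a ' ') = true := by
        have := hj 0 (Nat.zero_lt_succ d)
        rwa [show (a + ((0:Nat):Int)) % 26 = a by omega] at this
      have hmod : PySem.Int.mod (a + 1) 26 = (a + 1) % 26 :=
        PySem.Int.mod_eq_emod_of_pos (by norm_num)
      have hrec := ih f ((a + 1) % 26) (by omega) (by omega) (by omega)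
        (by intro j hjd
            have h := hj (j + 1) (by omega)
            rw [show ((a + 1) % 26 + (j:Int)) % 26 = (a + (((j:Nat) + 1 : Nat) : Int)) % 26 by
              push_cast; omega]
            exact h)
        (by have h := hP
            rw [show ((a + 1) % 26 + (d:Int)) % 26 = (a + (((d:Nat) + 1 : Nat) : Int)) % 26 by
              push_cast; omega]
            exact h)
      simp only [pvWhileSkip]
      rw [if_pos h0, hmod, hrec]
      push_cast; omega

theorem pv_getElem_idx_congr {α : Type} (l : List α) {a b : Nat} (h : a = b) (ha : a < l.length) :
    l[a]'ha = l[b]'(h ▸ ha) := by subst h; rfl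

-- one reduced-step from a code of K lands on the cyclically next code of K
-- (K abstract: increasing codes < 26, membership = not skipped)
theorem pv_step_gen (L : List Char) (K : List Nat)
    (hpair : K.Pairwise (· < ·))
    (hmemiff : ∀ k : Nat, k ∈ K ↔ k < 26 ∧ L.contains (Char.ofNat (97 + k)) = false)
    (i : Nat) (hi : i < K.length) :
    pvWhileSkip L 26 (PySem.Int.mod ((K[i] : Int) + 1) 26)
      = (K[(i + 1) % K.length]'(Nat.mod_lt _ (by omega)) : Int) := by
  have hn : 0 < K.length := by omega
  have hmonoK : ∀ p q (hq : q < K.length) (hpq : p < q), K[p]'(Nat.lt_trans hpq hq) < K[q]'hq :=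
    fun p q hq hpq => List.pairwise_iff_getElem.mp hpair p q (Nat.lt_trans hpq hq) hq hpq
  have hlt26 : ∀ m (hm : m < K.length), K[m] < 26 :=
    fun m hm => ((hmemiff _).mp (List.getElem_mem hm)).1
  have ha26 : K[i] < 26 := hlt26 i hi
  have hnotmem : ∀ x : Nat, x < 26 → x ∉ K → L.contains (Char.ofNat (97 + x)) = true := by
    intro x hx hxm
    by_contra h
    exact hxm ((hmemiff x).mpr ⟨hx, by revert h; cases (L.contains (Char.ofNat (97 + x))) <;> simp⟩)
  have habcN : ∀ x : Nat, x < 26 → PySem.List.pyGetD pvAbc ((x : Nat) : Int) ' ' = Char.ofNat (97 + x) := by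
    intro x hx
    rw [pvAbc_pyGetD _ (by positivity) (by exact_mod_cast hx), Int.toNat_natCast]
  have hmemval : ∀ x : Nat, x ∈ K → ∃ m, ∃ hm : m < K.length, K[m] = x := by
    intro x hx; exact List.mem_iff_getElem.mp hx
  have hminmax : ∀ x : Nat, x ∈ K → K[0] ≤ x ∧ x ≤ K[K.length - 1]'(by omega) := by
    intro x hx
    obtain ⟨m, hm, rfl⟩ := hmemval x hx
    constructor
    · rcases Nat.eq_zero_or_pos m with h | h
      · subst h; exact Nat.le_refl _
      · exact Nat.le_of_lt (hmonoK 0 m hm h)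
    · rcases Nat.lt_or_ge m (K.length - 1) with h | h
      · exact Nat.le_of_lt (hmonoK m (K.length - 1) (by omega) h)
      · have : m = K.length - 1 := by omega
        subst this; exact Nat.le_refl _
  have hmod : PySem.Int.mod (((K[i] : Nat) : Int) + 1) 26 = (((K[i] : Nat) : Int) + 1) % 26 :=
    PySem.Int.mod_eq_emod_of_pos (by norm_num)
  rw [hmod]
  rcases Nat.lt_or_ge (i + 1) K.length with hin | hin
  · -- interior: next code is K[i+1]
    have hlt : K[i] < K[i + 1] := hmonoK i (i + 1) hin (Nat.lt_succ_self i)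
    have hc26 : K[i + 1] < 26 := hlt26 (i + 1) hin
    have hrun := pvWhile_run L (K[i + 1] - (K[i] + 1)) 26 ((K[i] : Int) + 1)
      (by omega) (by omega) (by omega)
      (by intro j hj
          have hx26 : K[i] + 1 + j < 26 := by omega
          have hxval : ((K[i] : Int) + 1 + (j : Int)) % 26 = ((K[i] + 1 + j : Nat) : Int) := by
            push_cast; omega
          rw [hxval, habcN _ (by omega)]
          refine hnotmem (K[i] + 1 + j) (by omega) ?_
          intro hmem
          obtain ⟨m, hm, hmv⟩ := hmemval _ hmem
          have h1 : K[i] < K[m] := by rw [hmv]; omega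
          have h2 : K[m] < K[i + 1] := by rw [hmv]; omega
          rcases Nat.lt_or_ge m (i + 1) with h | h
          · rcases Nat.lt_or_ge m i with h' | h'
            · exact absurd (hmonoK m i hi h') (by omega)
            · have hmi : m = i := by omega
              subst hmi; omega
          · rcases Nat.lt_or_ge (i + 1) m with h' | h'
            · exact absurd (hmonoK (i + 1) m hm h') (by omega)
            · have hmi : m = i + 1 := by omega
              subst hmi; omega)
      (by have hxval : ((K[i] : Int) + 1 + ((K[i + 1] - (K[i] + 1) : Nat) : Int)) % 26
              = ((K[i + 1] : Nat) : Int) := by push_cast; omega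
          rw [hxval, habcN _ (by omega)]
          have := (hmemiff K[i + 1]).mp (List.getElem_mem hin)
          simpa using this.2)
    rw [show ((K[i] : Int) + 1) % 26 = (K[i] : Int) + 1 from by omega, hrun]
    simp only [Nat.mod_eq_of_lt hin]
    omega
  · -- wrap-around: i is the last index, next code is K[0]
    have hieq : i + 1 = K.length := by omega
    have h0lt : 0 < K.length := by omega
    have hmax : ∀ x : Nat, x ∈ K → x ≤ K[i] := by
      intro x hx
      obtain ⟨m, hm, rfl⟩ := hmemval x hx
      rcases Nat.lt_or_ge m i with h | h
      · exact Nat.le_of_lt (hmonoK m i hi h)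
      · have hmi : m = i := by omega
        subst hmi; exact Nat.le_refl _
    have hmin : ∀ x : Nat, x ∈ K → K[0]'h0lt ≤ x := by
      intro x hx
      obtain ⟨m, hm, rfl⟩ := hmemval x hx
      rcases Nat.eq_zero_or_pos m with h | h
      · subst h; exact Nat.le_refl _
      · exact Nat.le_of_lt (hmonoK 0 m hm h)
    set c0 : Nat := K[0]'h0lt with hc0def
    have hc026 : c0 < 26 := hlt26 0 h0lt
    have hc0i : c0 ≤ K[i] := hmin _ (List.getElem_mem hi)
    have hrun := pvWhile_run L (25 - K[i] + c0) 26 (((K[i] : Int) + 1) % 26)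
      (by omega) (by omega) (by omega)
      (by intro j hj
          set x : Int := (((K[i] : Int) + 1) % 26 + (j : Int)) % 26 with hx
          have hx0 : 0 ≤ x := by omega
          have hx26 : x < 26 := by omega
          rw [pvAbc_pyGetD x hx0 hx26]
          refine hnotmem x.toNat (by omega) ?_
          intro hmem
          have hb1 := hmin x.toNat hmem
          have hb2 := hmax x.toNat hmem
          omega)
      (by have hval : ∀ z : Int, z = (c0 : Int) →
              L.contains (PySem.List.pyGetD pvAbc z ' ') = false := by
            intro z hz
            rw [hz, habcN _ (by omega)]
            have hm := (hmemiff c0).mp (by rw [hc0def]; exact List.getElem_mem h0lt)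
            simpa using hm.2
          exact hval _ (by push_cast; omega))
    rw [hrun]
    have hmodn : (i + 1) % K.length = 0 := by rw [hieq, Nat.mod_self]
    rw [pv_getElem_idx_congr K hmodn, ← hc0def]
    omega

-- folding a constant-function over a list is function iteration
theorem pv_foldl_const {α β : Type} (g : α → α) :
    ∀ (l : List β) (x : α), l.foldl (fun c _ => g c) x = g^[l.length] x := by
  intro l
  induction l with
  | nil => intro x; simp
  | cons h t ih =>
    intro x
    simp only [List.foldl_cons, List.length_cons, ih, Function.iterate_succ_apply]

-- iterating the reduced-step k times moves k places along the kept cycle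
theorem pv_iter_gen (L : List Char) (K : List Nat)
    (hpair : K.Pairwise (· < ·))
    (hmemiff : ∀ k : Nat, k ∈ K ↔ k < 26 ∧ L.contains (Char.ofNat (97 + k)) = false)
    (k : Nat) : ∀ (i : Nat) (hi : i < K.length),
    (fun code => pvWhileSkip L 26 (PySem.Int.mod (code + 1) 26))^[k] ((K[i] : Nat) : Int)
      = ((K[(i + k) % K.length]'(Nat.mod_lt _ (by omega)) : Nat) : Int) := by
  induction k with
  | zero =>
    intro i hi
    simp [Nat.mod_eq_of_lt hi]
  | succ k ih =>
    intro i hi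
    have hn : 0 < K.length := by omega
    rw [Function.iterate_succ_apply]
    have hstep := pv_step_gen L K hpair hmemiff i hi
    simp only at hstep
    rw [hstep, ih ((i + 1) % K.length) (Nat.mod_lt _ hn)]
    have hidx : ((i + 1) % K.length + k) % K.length = (i + (k + 1)) % K.length := by
      rw [Nat.mod_add_mod]
      congr 1
      omega
    exact congrArg (fun n : Nat => (n : Int)) (pv_getElem_idx_congr K hidx _)

-- removing distinct present elements from a nodup list shortens it by their number
theorem pv_filter_len (ks : List Char) : ∀ (l : List Char), l.Nodup → ks.Nodup →
    (∀ c ∈ ks, c ∈ l) →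
    (l.filter (fun c => !(ks.contains c))).length = l.length - ks.length := by
  induction ks with
  | nil => intro l _ _ _; simp
  | cons k t ih =>
    intro l hl hkt hmem
    have hk : k ∈ l := hmem k (by simp)
    have ht : t.Nodup := (List.nodup_cons.mp hkt).2
    have hknt : k ∉ t := (List.nodup_cons.mp hkt).1
    have hsub : ∀ c ∈ t, c ∈ l.erase k := by
      intro c hc
      have hne : c ≠ k := fun h => hknt (h ▸ hc)
      exact (List.mem_erase_of_ne hne).mpr (hmem c (by simp [hc]))
    have hstep : l.filter (fun c => !((k :: t).contains c))
        = (l.erase k).filter (fun c => !(t.contains c)) := by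
      rw [hl.erase_eq_filter k, List.filter_filter]
      apply List.filter_congr
      intro c _
      by_cases hck : c = k <;> by_cases hct : c ∈ t <;> simp [hck, hct]
    rw [hstep, ih (l.erase k) (hl.erase k) ht hsub, List.length_erase_of_mem hk]
    simp
    omega

-- the remove-loop of A computes a filter, for distinct present elements
theorem pv_remove_fold (ks : List Char) : ∀ (l : List Char), l.Nodup → ks.Nodup →
    (∀ c ∈ ks, c ∈ l) →
    ks.foldl (fun acc e => acc.bind fun cs => PySem.List.remove? cs e) (some l)
      = some (l.filter (fun c => !(ks.contains c))) := by
  induction ks with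
  | nil => intro l _ _ _; simp
  | cons k t ih =>
    intro l hl hkt hmem
    have hk : k ∈ l := hmem k (by simp)
    have hrm : PySem.List.remove? l k = some (l.erase k) :=
      PySem.List.remove?_eq_some_erase l k hk
    have ht : t.Nodup := (List.nodup_cons.mp hkt).2
    have hknt : k ∉ t := (List.nodup_cons.mp hkt).1
    have hsub : ∀ c ∈ t, c ∈ l.erase k := by
      intro c hc
      have hne : c ≠ k := fun h => hknt (h ▸ hc)
      exact (List.mem_erase_of_ne hne).mpr (hmem c (by simp [hc]))
    have := ih (l.erase k) (hl.erase k) ht hsub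
    simp only [List.foldl_cons, Option.bind_some, hrm, this]
    congr 1
    rw [hl.erase_eq_filter k, List.filter_filter]
    apply List.filter_congr
    intro c _
    by_cases hck : c = k <;> by_cases hct : c ∈ t <;> simp [hck, hct]

-- A's append-one-char-per-element loop, when every lookup succeeds
theorem pv_fold_chars (F : Char → Option Char) (f : Char → Char) :
    ∀ (cs : List Char) (acc : List Char), (∀ c ∈ cs, F c = some (f c)) →
    cs.foldl (fun a c => a.bind fun ans => (F c).map fun ch => ans ++ [ch]) (some acc)
      = some (acc ++ cs.map f) := by
  intro cs
  induction cs with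
  | nil => intro acc _; simp
  | cons c t ih =>
    intro acc h
    have hc : F c = some (f c) := h c (by simp)
    simp only [List.foldl_cons, Option.bind_some, hc, Option.map_some, List.map_cons]
    rw [ih (acc ++ [f c]) (fun x hx => h x (by simp [hx]))]
    simp

-- indexing the tripled list with a Nat index
theorem pv_get3 (r : List Char) (k : Nat) (hk : k < 3 * r.length) :
    (r ++ r ++ r)[k]? = r[k % r.length]? := by
  by_cases h1 : k < r.length
  · rw [List.getElem?_append_left (by simp [List.length_append]; omega),
        List.getElem?_append_left h1, Nat.mod_eq_of_lt h1]
  · by_cases h2 : k < 2 * r.length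
    · rw [List.getElem?_append_left (by simp [List.length_append]; omega),
          List.getElem?_append_right (by omega)]
      have : k % r.length = k - r.length := by
        rw [Nat.mod_eq_sub_mod (by omega), Nat.mod_eq_of_lt (by omega)]
      rw [this]
    · rw [List.getElem?_append_right (by simp [List.length_append]; omega)]
      have : k % r.length = k - (r ++ r).length := by
        simp only [List.length_append]
        rw [Nat.mod_eq_sub_mod (by omega), Nat.mod_eq_sub_mod (by omega),
            Nat.mod_eq_of_lt (by omega)]
        omega
      rw [this]

-- A's tripled-list access with a possibly negative index is modular access
theorem pv_triple_get (r : List Char) (j : Int) (hne : r ≠ [])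
    (h1 : -(3 * (r.length : Int)) ≤ j) (h2 : j < 3 * (r.length : Int)) :
    PySem.List.pyGet? (r ++ r ++ r) j
      = some (PySem.List.pyGetD r (PySem.Int.mod j (r.length : Int)) 'a') := by
  have hL : 0 < r.length := List.length_pos_iff.mpr hne
  have hLi : (0 : Int) < (r.length : Int) := by exact_mod_cast hL
  have hm0 : 0 ≤ PySem.Int.mod j (r.length : Int) := PySem.Int.mod_nonneg j hLi
  have hm1 : PySem.Int.mod j (r.length : Int) < (r.length : Int) := PySem.Int.mod_lt j hLi
  rw [PySem.List.pyGetD_eq_getElem r 'a' hm0 hm1]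
  have hmod : PySem.Int.mod j (r.length : Int) = j % (r.length : Int) :=
    PySem.Int.mod_eq_emod_of_pos hLi
  have hlen3 : (r ++ r ++ r).length = 3 * r.length := by
    simp [List.length_append]; omega
  have key : ∀ (k : Nat), (k : Int) % (r.length : Int) = j % (r.length : Int) →
      k < 3 * r.length → (r ++ r ++ r)[k]? =
        some r[(PySem.Int.mod j (r.length : Int)).toNat] := by
    intro k hkj hk3
    rw [pv_get3 r k hk3]
    have : ((k % r.length : Nat) : Int) = PySem.Int.mod j (r.length : Int) := by
      rw [hmod, ← hkj]; exact_mod_cast Int.natCast_mod k r.length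
    have hkeq : k % r.length = (PySem.Int.mod j (r.length : Int)).toNat := by omega
    rw [hkeq, List.getElem?_eq_getElem (by omega)]
  simp only [PySem.List.pyGet?, PySem.List.pyIdx?, hlen3]
  by_cases hj : 0 ≤ j
  · rw [if_pos hj, if_pos (by push_cast; omega)]
    simp only [Option.bind_some]
    exact key j.toNat (by rw [Int.toNat_of_nonneg hj]) (by omega)
  · rw [if_neg hj, if_pos (by push_cast; omega)]
    simp only [Option.bind_some]
    apply key (3 * r.length - (-j).toNat)
    · have hcast : ((3 * r.length - (-j).toNat : Nat) : Int) = j + (r.length : Int) * 3 := by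
        omega
      rw [hcast, Int.add_mul_emod_self_left]
    · omega

-- ===== VERDICT (by name: the statement is the Claim_ definition above) =====
theorem solution_spec : Claim_equal_solution := by
  intro s skip index _ hpre
  obtain ⟨hnd, hsubB, hlen26, hsB⟩ := hpre
  have hsub : ∀ c ∈ skip.toList, c ∈ pvAbc := by
    intro c hc; simpa using (List.all_eq_true.mp hsubB) c hc
  have hs : ∀ c ∈ s.toList, c ∈ pvReduced skip ∧
      -(3 * ((pvReduced skip).length : Int)) ≤ ((pvReduced skip).idxOf c : Int) + index ∧
      ((pvReduced skip).idxOf c : Int) + index < 3 * ((pvReduced skip).length : Int) := by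
    intro c hc
    have h := (List.all_eq_true.mp hsB) c hc
    simp only [Bool.and_eq_true, List.contains_eq_mem, decide_eq_true_eq] at h
    exact ⟨h.1.1, h.1.2, h.2⟩
  -- shared facts about the reduced alphabet
  have hrlen : (pvReduced skip).length = 26 - skip.toList.length := by
    unfold pvReduced
    rw [pv_filter_len skip.toList pvAbc (by decide) hnd hsub]
    rfl
  have hrpos : 0 < (pvReduced skip).length := by omega
  set r := pvReduced skip with hr
  set K := pvKept skip.toList with hK
  have hrmap : r = K.map (fun k => Char.ofNat (97 + k)) := pvReduced_eq skip
  have hKlen : K.length = r.length := by rw [hrmap, List.length_map]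
  have hrnd : r.Nodup := by rw [hr]; exact (by decide : pvAbc.Nodup).filter _
  -- the per-character value both sides compute
  set f : Char → Char := fun c =>
    PySem.List.pyGetD r (PySem.Int.mod ((r.idxOf c : Int) + index) (r.length : Int)) 'a'
    with hf
  unfold Spec_solution solution solution_alt
  -- ===== side A =====
  rw [pv_remove_fold skip.toList pvAbc (by decide) hnd hsub]
  have hred : List.filter (fun c => !(skip.toList.contains c)) pvAbc = r := rfl
  dsimp only
  rw [hred]
  rw [pv_fold_chars _ f s.toList []
    (by
      intro c hc
      obtain ⟨hcr, hb1, hb2⟩ := hs c hc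
      have hne : r ≠ [] := List.ne_nil_of_mem hcr
      obtain ⟨p, hp⟩ := (PySem.List.index?_isSome_iff r c).mpr hcr |> Option.isSome_iff_exists.mp
      obtain ⟨hk, hgc, -⟩ := PySem.List.getElem_of_index?_eq_some hp
      have hpi : r.idxOf c = p := by
        have := hrnd.idxOf_getElem p hk
        rwa [hgc] at this
      rw [PySem.List.index?_append_of_mem _ (List.mem_append_left r hcr),
          PySem.List.index?_append_of_mem _ hcr, hp]
      simp only [Option.bind_some, hf, hpi]
      exact pv_triple_get r _ hne (hpi ▸ hb1) (hpi ▸ hb2))]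
  -- ===== side B =====
  have hn0 : (26 : Int) - PySem.Str.len skip ≠ 0 := by
    rw [PySem.Str.len_eq]; omega
  have hmodq : PySem.Int.mod? index (26 - PySem.Str.len skip)
      = some (PySem.Int.mod index (26 - PySem.Str.len skip)) := by
    unfold PySem.Int.mod? PySem.Int.mod
    rw [if_neg hn0]
  rw [hmodq]
  dsimp only
  set nI : Int := (r.length : Int) with hnI
  have hlenskip : (26 : Int) - PySem.Str.len skip = nI := by
    rw [PySem.Str.len_eq, hnI]; omega
  rw [hlenskip]
  have hnIpos : 0 < nI := by rw [hnI]; exact_mod_cast hrpos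
  set steps : Int := PySem.Int.mod index nI with hsteps
  have hst0 : 0 ≤ steps := PySem.Int.mod_nonneg index hnIpos
  have hst1 : steps < nI := PySem.Int.mod_lt index hnIpos
  have hpairK : K.Pairwise (· < ·) := pvKept_pairwise skip.toList
  have hmemiffK : ∀ k : Nat, k ∈ K ↔ k < 26 ∧ skip.toList.contains (Char.ofNat (97 + k)) = false :=
    pvKept_mem skip.toList
  rw [pv_fold_chars _ f s.toList []
    (by
      intro c hc
      obtain ⟨hcr, -, -⟩ := hs c hc
      -- c = r[i] with i = r.idxOf c; its code is K[i]
      have hi : r.idxOf c < r.length := List.idxOf_lt_length_of_mem hcr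
      set i := r.idxOf c with hiv
      have hiK : i < K.length := by omega
      have hci : r[i]'hi = c := List.getElem_idxOf hi
      have hceq : c = Char.ofNat (97 + K[i]'hiK) := by
        rw [← hci]
        simp only [hrmap]
        rw [List.getElem_map]
      have hKi26 : K[i]'hiK < 26 := pvKept_lt26 skip.toList i hiK
      -- k = abc.index(c) finds exactly the code K[i]
      have hcabc : c ∈ pvAbc := by
        have hfil : c ∈ pvAbc.filter (fun c => !(skip.toList.contains c)) := hcr
        exact List.mem_of_mem_filter hfil
      obtain ⟨p, hp⟩ := Option.isSome_iff_exists.mp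
        ((PySem.List.index?_isSome_iff pvAbc c).mpr hcabc)
      obtain ⟨hk, hgc, -⟩ := PySem.List.getElem_of_index?_eq_some hp
      have habcnd : pvAbc.Nodup := by decide
      have hgKi : pvAbc[K[i]'hiK]'hKi26 = c := by
        rw [pvAbc_get _ hKi26]; exact hceq.symm
      have hpi : p = K[i]'hiK := by
        have h1 := habcnd.idxOf_getElem p hk
        have h2 := habcnd.idxOf_getElem (K[i]'hiK) hKi26
        rw [hgc] at h1
        rw [hgKi] at h2
        omega
      rw [hp, hpi]
      simp only [Option.map_some]
      -- the range-loop is steps.toNat iterations of the reduced-step from code K[i]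
      rw [pv_foldl_const, PySem.List.length_pyRange_one]
      have hiter := pv_iter_gen skip.toList K hpairK hmemiffK (steps - 0).toNat i hiK
      simp only at hiter
      rw [hiter]
      -- A\'s index equals B\'s position on the kept cycle
      have hmodA : PySem.Int.mod ((i : Int) + index) nI
          = (((i + (steps - 0).toNat) % K.length : Nat) : Int) := by
        have h1 : PySem.Int.mod ((i : Int) + index) nI = ((i : Int) + index) % nI :=
          PySem.Int.mod_eq_emod_of_pos hnIpos
        have h2 : steps = index % nI := by
          rw [hsteps]; exact PySem.Int.mod_eq_emod_of_pos hnIpos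
        have h3 : ((i : Int) + index) % nI = ((i : Int) + steps) % nI := by
          rw [h2, Int.add_emod_emod]
        have hKn : (K.length : Int) = nI := by rw [hKlen]
        rw [h1, h3]
        have hi' : (i : Int) < nI := by rw [hnI]; exact_mod_cast hi
        rcases lt_or_ge ((i : Int) + steps) nI with h | h
        · rw [Int.emod_eq_of_lt (by positivity) h]
          have : (i + (steps - 0).toNat) % K.length = i + (steps - 0).toNat := by
            apply Nat.mod_eq_of_lt; omega
          rw [this]; push_cast; omega
        · have hlt2 : (i : Int) + steps < 2 * nI := by omega
          have : ((i : Int) + steps) % nI = (i : Int) + steps - nI := by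
            conv_lhs => rw [show (i : Int) + steps = ((i : Int) + steps - nI) + nI * 1 from by ring]
            rw [Int.add_mul_emod_self_left]
            exact Int.emod_eq_of_lt (by omega) (by omega)
          rw [this]
          have hN : (i + (steps - 0).toNat) % K.length = i + (steps - 0).toNat - K.length := by
            rw [Nat.mod_eq_sub_mod (by omega)]
            apply Nat.mod_eq_of_lt; omega
          rw [hN]; push_cast; omega
      have hposK : (i + (steps - 0).toNat) % K.length < K.length := Nat.mod_lt _ (by omega)
      have hposK26 : K[(i + (steps - 0).toNat) % K.length]'hposK < 26 :=
        pvKept_lt26 skip.toList _ hposK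
      -- both sides name the same letter of the reduced alphabet
      rw [pvAbc_pyGetD _ (by positivity) (by exact_mod_cast hposK26), Int.toNat_natCast]
      simp only [hf]
      rw [← hiv, hmodA]
      rw [PySem.List.pyGetD_eq_getElem r 'a' (by positivity)
        (by exact_mod_cast (by omega : (i + (steps - 0).toNat) % K.length < r.length))]
      congr 1
      have hgoal : r[((((i + (steps - 0).toNat) % K.length : Nat) : Int)).toNat]'(by
          rw [Int.toNat_natCast]; omega)
          = Char.ofNat (97 + K[(i + (steps - 0).toNat) % K.length]'hposK) := by
        simp only [Int.toNat_natCast]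
        simp only [hrmap]
        rw [List.getElem_map]
      exact hgoal.symm)]
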